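-- pv_equiv track=rewrite | github.com/pvvkishore/NLPA_SKILL_2025 | langchain_qna_generator.py | extract_answer_from_context
-- ===== SOURCE A (Python) =====
-- def extract_answer_from_context(question: str, context: str) -> str:
--     """Extract answer from context using simple heuristics"""
--     sentences = context.split('. ')
--
--     # Simple keyword matching
--     question_words = question.lower().split()
--     best_sentences = []
--
--     for sentence in sentences:
--         score = sum(1 for word in question_words if word in sentence.lower())
--         if score > 0:
--             best_sentences.append((sentence, score))
--
--     if best_sentences:
--         best_sentences.sort(key=lambda x: x[1], reverse=True)
--         return best_sentences[0][0] + '.'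
--
--     return "Based on the available information: " + sentences[0][:200] + "..."
-- ===== SOURCE B (Python) =====
-- def extract_answer_from_context(question: str, context: str) -> str:
--     """Single pass: keep the first sentence with a strictly higher keyword score
--     instead of collecting all scored sentences and stable-sorting them."""
--     sentences = context.split('. ')
--     question_words = question.lower().split()
--
--     best_sentence = None
--     best_score = 0
--     for sentence in sentences:
--         lowered = sentence.lower()
--         score = len([word for word in question_words if word in lowered])
--         if best_score < score:
--             best_sentence = sentence
--             best_score = score
--
--     if best_sentence is not None:
--         return best_sentence + '.'
--
--     return "Based on the available information: " + sentences[0][:200] + "..."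
-- ===== Notes on version B (the rewrite author's own statement) =====
-- stated objective: simpler
-- what changed: Replaces A's collect-scored-sentences list, stable reverse sort and take-first pipeline by a single pass that keeps the first sentence with a strictly greater keyword score.
import Mathlib
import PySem

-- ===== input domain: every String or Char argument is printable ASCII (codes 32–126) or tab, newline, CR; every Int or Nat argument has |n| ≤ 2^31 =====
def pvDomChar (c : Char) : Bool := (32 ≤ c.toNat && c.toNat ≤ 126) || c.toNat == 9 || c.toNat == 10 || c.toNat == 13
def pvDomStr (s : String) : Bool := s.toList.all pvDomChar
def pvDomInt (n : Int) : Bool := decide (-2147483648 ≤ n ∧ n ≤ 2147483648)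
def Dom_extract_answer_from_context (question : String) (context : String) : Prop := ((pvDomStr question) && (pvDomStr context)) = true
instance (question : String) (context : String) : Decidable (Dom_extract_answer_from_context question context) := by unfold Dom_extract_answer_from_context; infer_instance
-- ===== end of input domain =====

-- B replaces A's collect/stable-reverse-sort pipeline by a single strict-max pass
-- over the sentences (objective: simpler; return value only, no side effects).


-- ===== PORT A =====
-- context.split('. ') with a nonempty separator never returns None (getD [] is unreachable)
-- and its result is never empty (headD "" in the fallback is unreachable).
def extract_answer_from_context (question : String) (context : String) : String :=
  let sentences := (PySem.Str.split? context ". ").getD []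
  let question_words := PySem.Str.split₀ (PySem.Str.lower question)
  let best_sentences : List (String × Int) := sentences.foldl (fun acc sentence =>
    let score : Int := (question_words.map (fun word =>
      if PySem.Str.isIn word (PySem.Str.lower sentence) then 1 else 0)).sum
    if score > 0 then acc ++ [(sentence, score)] else acc) []
  if best_sentences.isEmpty then
    "Based on the available information: " ++
      PySem.Str.slice (sentences.headD "") none (some 200) ++ "..."
  else
    ((PySem.List.sorted best_sentences (fun p => p.2) true).headD ("", 0)).1 ++ "."

-- ===== PORT B =====
def extract_answer_from_context_alt (question : String) (context : String) : String :=
  let sentences := (PySem.Str.split? context ". ").getD []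
  let question_words := PySem.Str.split₀ (PySem.Str.lower question)
  let best := sentences.foldl (fun (st : Option String × Int) sentence =>
    let lowered := PySem.Str.lower sentence
    let score : Int := ((question_words.filter (fun word => PySem.Str.isIn word lowered)).length : Int)
    if st.2 < score then (some sentence, score) else st) (none, 0)
  match best.1 with
  | some s => s ++ "."
  | none =>
    "Based on the available information: " ++
      PySem.Str.slice (sentences.headD "") none (some 200) ++ "..."

-- ===== PRECONDITION & SPEC =====
def Spec_extract_answer_from_context (question : String) (context : String) (out : String) : Prop := out = extract_answer_from_context_alt question context
instance (question : String) (context : String) (out : String) : Decidable (Spec_extract_answer_from_context question context out) := by unfold Spec_extract_answer_from_context; infer_instance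

-- ===== CLAIM (what is proved, stated in full; the proofs are below) =====
def Claim_equal_extract_answer_from_context : Prop := ∀ (question : String) (context : String), Dom_extract_answer_from_context question context → Spec_extract_answer_from_context question context (extract_answer_from_context question context)

-- ===== LEMMAS AND PROOFS =====

-- the strict-max one-pass step over already-scored candidates
def pvStep {α : Type} (key : α → Int) (acc : Option α) (x : α) : Option α :=
  match acc with
  | none => some x
  | some b => if key b < key x then some x else some b

-- head of Python's stable reverse sort = first element with maximal key, as a one-pass fold
theorem head?_sorted_rev {α : Type} (ps : List α) (key : α → Int) :
    (PySem.List.sorted ps key true).head? = ps.foldl (pvStep key) none := by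
  induction ps using List.reverseRecOn with
  | nil => simp [PySem.List.sorted]
  | append_singleton l x ih =>
    rw [PySem.List.sorted_rev_eq_foldl_insertBy, List.foldl_append, List.foldl_append,
      ← PySem.List.sorted_rev_eq_foldl_insertBy]
    simp only [List.foldl_cons, List.foldl_nil]
    rw [← ih]
    cases h : PySem.List.sorted l key true with
    | nil =>
      simp [PySem.List.insertBy, pvStep]
    | cons m t =>
      rw [PySem.List.insertBy.eq_2]
      simp only [pvStep]
      split_ifs with hb
      · simp only [decide_eq_true_eq] at hb
        simp [hb]
      · simp only [decide_eq_true_eq] at hb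
        simp [hb]

-- a fold of pvStep starting at none returns an element of the list (or none)
theorem pvStep_mem {α : Type} (key : α → Int) (l : List α) (p : α)
    (h : l.foldl (pvStep key) none = some p) : p ∈ l := by
  induction l using List.reverseRecOn with
  | nil => simp at h
  | append_singleton l x ih =>
    rw [List.foldl_append, List.foldl_cons, List.foldl_nil] at h
    cases hl : l.foldl (pvStep key) none with
    | none => rw [hl] at h; simp [pvStep] at h; simp [h]
    | some b =>
      rw [hl] at h
      simp only [pvStep] at h
      split_ifs at h <;> simp_all

-- B's fold over sentences = the strict-max fold over A's positively-scored pairs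
theorem bfold_eq {α : Type} (score : α → Int) (hsc : ∀ x, 0 ≤ score x) (l : List α) :
    l.foldl (fun (st : Option α × Int) x =>
        if st.2 < score x then (some x, score x) else st) (none, 0)
      = (match ((l.map (fun x => (x, score x))).filter (fun p => decide (p.2 > 0))).foldl
            (pvStep (fun p : α × Int => p.2)) none with
         | none => (none, 0)
         | some p => (some p.1, p.2)) := by
  induction l using List.reverseRecOn with
  | nil => simp
  | append_singleton l x ih =>
    rw [List.foldl_append, List.foldl_cons, List.foldl_nil, ih,
      List.map_append, List.filter_append, List.foldl_append]
    simp only [List.map_cons, List.map_nil, List.filter]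
    by_cases hx : 0 < score x
    · simp only [decide_eq_true hx, gt_iff_lt]
      cases hf : ((l.map (fun x => (x, score x))).filter (fun p => decide (p.2 > 0))).foldl
          (pvStep (fun p : α × Int => p.2)) none with
      | none => simp [pvStep, hx]
      | some b =>
        have hb : 0 < b.2 := by
          have := pvStep_mem _ _ _ hf
          simp only [List.mem_filter] at this
          simpa using this.2
        simp only [List.foldl_cons, List.foldl_nil, pvStep]
        split_ifs with h <;> simp_all
    · have hx0 : score x = 0 := le_antisymm (by omega) (hsc x)
      have : decide (score x > 0) = false := by simp [hx]
      rw [this]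
      simp only [List.foldl_nil]
      cases hf : ((l.map (fun x => (x, score x))).filter (fun p => decide (p.2 > 0))).foldl
          (pvStep (fun p : α × Int => p.2)) none with
      | none => simp [hx0]
      | some b =>
        have hb : 0 < b.2 := by
          have := pvStep_mem _ _ _ hf
          simp only [List.mem_filter] at this
          simpa using this.2
        simp only []
        split_ifs with h
        · omega
        · rfl

-- ===== VERDICT (by name: the statement is the Claim_ definition above) =====
theorem extract_answer_from_context_spec : Claim_equal_extract_answer_from_context := by
  intro question context _
  unfold Spec_extract_answer_from_context extract_answer_from_context extract_answer_from_context_alt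
  simp only []
  set sentences := (PySem.Str.split? context ". ").getD [] with hs
  set qw := PySem.Str.split₀ (PySem.Str.lower question) with hq
  -- the two per-sentence scores agree
  have hscore : ∀ s : String,
      ((qw.map (fun word => if PySem.Str.isIn word (PySem.Str.lower s) then (1:Int) else 0)).sum)
        = ((qw.filter (fun word => PySem.Str.isIn word (PySem.Str.lower s))).length : Int) := by
    intro s
    rw [PySem.List.sum_map_ite_one_zero]
    simp [List.countP_eq_length_filter]
  -- rewrite A's accumulation loop as filter-of-map
  have hA : sentences.foldl (fun acc sentence =>
      let score : Int := (qw.map (fun word =>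
        if PySem.Str.isIn word (PySem.Str.lower sentence) then 1 else 0)).sum
      if score > 0 then acc ++ [(sentence, score)] else acc) []
      = (sentences.map (fun s => (s, (qw.map (fun word =>
          if PySem.Str.isIn word (PySem.Str.lower s) then (1:Int) else 0)).sum))).filter
          (fun p => decide (p.2 > 0)) := by
    have := PySem.List.foldl_append_if
      (fun s : String => decide ((qw.map (fun word =>
        if PySem.Str.isIn word (PySem.Str.lower s) then (1:Int) else 0)).sum > 0))
      (fun s : String => (s, (qw.map (fun word =>
        if PySem.Str.isIn word (PySem.Str.lower s) then (1:Int) else 0)).sum))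
      sentences []
    simp only [List.nil_append] at this
    rw [show (fun (acc : List (String × Int)) sentence =>
        let score : Int := (qw.map (fun word =>
          if PySem.Str.isIn word (PySem.Str.lower sentence) then 1 else 0)).sum
        if score > 0 then acc ++ [(sentence, score)] else acc)
      = (fun acc x => if (decide ((qw.map (fun word =>
          if PySem.Str.isIn word (PySem.Str.lower x) then (1:Int) else 0)).sum > 0)) = true
          then acc ++ [(x, (qw.map (fun word =>
            if PySem.Str.isIn word (PySem.Str.lower x) then (1:Int) else 0)).sum)] else acc) from by
        funext acc x; simp]
    rw [this, List.filter_map]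
    simp [Function.comp_def]
  rw [hA]
  -- rewrite B's fold via bfold_eq, with the score equality folded in
  have hBstep : (fun (st : Option String × Int) sentence =>
      let lowered := PySem.Str.lower sentence
      let score : Int := ((qw.filter (fun word => PySem.Str.isIn word lowered)).length : Int)
      if st.2 < score then (some sentence, score) else st)
      = (fun (st : Option String × Int) x =>
        if st.2 < (qw.map (fun word =>
          if PySem.Str.isIn word (PySem.Str.lower x) then (1:Int) else 0)).sum
        then (some x, (qw.map (fun word =>
          if PySem.Str.isIn word (PySem.Str.lower x) then (1:Int) else 0)).sum) else st) := by
    funext st x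
    simp only [hscore x]
  rw [hBstep, bfold_eq (fun s => (qw.map (fun word =>
      if PySem.Str.isIn word (PySem.Str.lower s) then (1:Int) else 0)).sum)
      (fun s => by simp only [hscore s]; positivity) sentences]
  -- compare the two final branches through head?_sorted_rev
  set ps := (sentences.map (fun s => (s, (qw.map (fun word =>
      if PySem.Str.isIn word (PySem.Str.lower s) then (1:Int) else 0)).sum))).filter
      (fun p => decide (p.2 > 0)) with hps
  have hhead := head?_sorted_rev ps (fun p : String × Int => p.2)
  cases hf : ps.foldl (pvStep (fun p : String × Int => p.2)) none with
  | none =>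
    have : PySem.List.sorted ps (fun p => p.2) true = [] := by
      cases h : PySem.List.sorted ps (fun p => p.2) true with
      | nil => rfl
      | cons m t => rw [h, hf] at hhead; simp at hhead
    have hempty : ps = [] := (PySem.List.sorted_eq_nil_iff _ _ _).mp this
    simp [hempty]
  | some p =>
    have hnonempty : ps ≠ [] := by
      intro h; rw [h] at hf; simp at hf
    have hne : ps.isEmpty = false := by simpa [List.isEmpty_iff] using hnonempty
    rw [hne]
    rw [hf] at hhead
    cases h : PySem.List.sorted ps (fun p => p.2) true with
    | nil => rw [h] at hhead; simp at hhead
    | cons m t =>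
      rw [h] at hhead
      simp only [List.head?_cons, Option.some.injEq] at hhead
      simp [hhead]
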